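-- pv_equiv track=rewrite | github.com/MaticTonin/Faks-FMF | 2 LETNIK/Programiranje/Funkcije/malica.py | kdaj_prej
-- ===== SOURCE A (Python) =====
-- def kdaj_prej(l):
--     ponavlja=[]
--     n=len(l)
--     for i in range(n):
--         p=1
--         j=(i-1)
--         while l[j % n] != l[i]:
--             p+=1
--             j-=1
--         ponavlja.append(p)
--     return ponavlja
-- ===== SOURCE B (Python) =====
-- def kdaj_prej(l):
--     n = len(l)
--     last = {}
--     res = []
--     for i, v in enumerate(l):
--         res.append(i - last[v] if v in last else -1)
--         last[v] = i
--     for i, v in enumerate(l):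
--         if res[i] == -1:
--             res[i] = i + n - last[v]
--     return res
-- ===== Notes on version B (the rewrite author's own statement) =====
-- stated objective: faster
-- what changed: A scans backwards cyclically from each index until it finds an equal element (quadratic); B makes one forward pass recording the last-seen index of each value in a dict (distance i-last[v], or -1), then a second pass that resolves the -1 entries cyclically via i+n-last[v].
import Mathlib
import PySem

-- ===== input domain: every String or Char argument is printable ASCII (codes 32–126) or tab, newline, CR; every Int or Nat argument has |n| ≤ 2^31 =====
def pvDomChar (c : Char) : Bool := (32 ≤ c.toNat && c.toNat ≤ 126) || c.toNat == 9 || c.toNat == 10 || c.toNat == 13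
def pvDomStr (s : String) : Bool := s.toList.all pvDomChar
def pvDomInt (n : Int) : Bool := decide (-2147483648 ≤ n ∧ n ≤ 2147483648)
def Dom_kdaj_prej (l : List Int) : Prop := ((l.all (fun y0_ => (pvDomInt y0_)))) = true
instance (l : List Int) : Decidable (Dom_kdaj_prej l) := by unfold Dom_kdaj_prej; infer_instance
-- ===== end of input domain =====

-- B replaces A's per-index backward cyclic scan by two linear passes with a
-- last-seen-index dictionary; same return value on every input.

-- ===== PORT A =====
-- the 'while l[j % n] != l[i]' loop; the fuel argument (called with l.length + 1) only
-- makes it total — the Python loop always stops within n steps since l[(i-n) % n] == l[i]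
def kdajLoop (l : List Int) (n t : Int) : Int → Int → Nat → Int
  | p, _, 0 => p
  | p, j, fuel+1 =>
    if PySem.List.pyGet? l (PySem.Int.mod j n) ≠ some t then
      kdajLoop l n t (p+1) (j-1) fuel
    else p

def kdaj_prej (l : List Int) : List Int :=
  let n : Int := l.length
  (PySem.List.pyRange 0 n 1).foldl
    (fun acc i => acc ++ [kdajLoop l n (PySem.List.pyGetD l i 0) 1 (i - 1) (l.length + 1)]) []

-- ===== PORT B =====
-- first pass of Source B: res entries (i - last[v] or -1) together with the last-seen dict
def passOne (l : List Int) : PySem.Dict Int Int × List Int :=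
  (PySem.List.enumerate l).foldl
    (fun st iv =>
      let r : Int := match st.1.get? iv.2 with
        | some j => iv.1 - j
        | none => -1
      (st.1.insert iv.2 iv.1, st.2 ++ [r]))
    (PySem.Dict.empty, [])

def kdaj_prej_alt (l : List Int) : List Int :=
  let n : Int := l.length
  let st := passOne l
  (PySem.List.enumerate (st.2.zip l)).map
    (fun p => if p.2.1 = -1 then p.1 + n - (st.1.get? p.2.2).getD 0 else p.2.1)

-- ===== PRECONDITION & SPEC =====
def Spec_kdaj_prej (l : List Int) (out : List Int) : Prop := out = kdaj_prej_alt l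
instance (l : List Int) (out : List Int) : Decidable (Spec_kdaj_prej l out) := by unfold Spec_kdaj_prej; infer_instance

-- ===== CLAIM (what is proved, stated in full; the proofs are below) =====
def Claim_equal_kdaj_prej : Prop := ∀ (l : List Int), Dom_kdaj_prej l → Spec_kdaj_prej l (kdaj_prej l)

-- ===== LEMMAS AND PROOFS =====

theorem passOne_snoc (l : List Int) (v : Int) :
    passOne (l ++ [v]) =
      ((passOne l).1.insert v (l.length : Int),
       (passOne l).2 ++ [match (passOne l).1.get? v with
                         | some j => (l.length : Int) - j
                         | none => -1]) := by
  simp [passOne, PySem.List.enumerate_append, List.foldl_append, PySem.List.enumerate_cons,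
    PySem.List.enumerate_nil]

theorem getD_concat_left {l : List Int} {v : Int} {k : Nat} (h : k < l.length) (d : Int) :
    (l ++ [v]).getD k d = l.getD k d := by
  simp [List.getD_eq_getElem?_getD, List.getElem?_append_left h]

theorem getD_concat_length (l : List Int) (v d : Int) :
    (l ++ [v]).getD l.length d = v := by
  simp [List.getD_eq_getElem?_getD]

theorem passOne_len (l : List Int) : (passOne l).2.length = l.length := by
  induction l using List.reverseRecOn with
  | nil => simp [passOne, PySem.List.enumerate_nil]
  | append_singleton xs x ih => rw [passOne_snoc]; simp [ih]

theorem dict_spec (l : List Int) (v : Int) :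
    ((passOne l).1.get? v = none ∧ ∀ k, k < l.length → l.getD k 0 ≠ v) ∨
    (∃ j, j < l.length ∧ (passOne l).1.get? v = some (j : Int) ∧ l.getD j 0 = v ∧
      ∀ k, j < k → k < l.length → l.getD k 0 ≠ v) := by
  induction l using List.reverseRecOn with
  | nil => left; constructor
           · simp [passOne, PySem.List.enumerate_nil]
           · intro k hk; simp at hk
  | append_singleton xs x ih =>
    rw [passOne_snoc]
    by_cases hvx : v = x
    · right
      refine ⟨xs.length, by simp, ?_, ?_, ?_⟩
      · simp [hvx]
      · rw [hvx, getD_concat_length]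
      · intro k h1 h2; simp at h2; omega
    · have hins : ((passOne xs).1.insert x (xs.length : Int)).get? v = (passOne xs).1.get? v := by
        simp [PySem.Dict.get?_insert, hvx]
      rcases ih with ⟨hnone, hall⟩ | ⟨j, hj, hget, hval, hmax⟩
      · left
        refine ⟨by rw [hins]; exact hnone, ?_⟩
        intro k hk
        rcases Nat.lt_or_ge k xs.length with h | h
        · rw [getD_concat_left h]; exact hall k h
        · have : k = xs.length := by simp at hk; omega
          rw [this, getD_concat_length]; exact fun h => hvx h.symm
      · right
        refine ⟨j, by simp; omega, by rw [hins]; exact hget, ?_, ?_⟩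
        · rw [getD_concat_left hj]; exact hval
        · intro k h1 h2
          rcases Nat.lt_or_ge k xs.length with h | h
          · rw [getD_concat_left h]; exact hmax k h1 h
          · have : k = xs.length := by simp at h2; omega
            rw [this, getD_concat_length]; exact fun h => hvx h.symm

theorem res_spec (l : List Int) (i : Nat) (hi : i < l.length) :
    ((passOne l).2.getD i 0 = -1 ∧ ∀ j, j < i → l.getD j 0 ≠ l.getD i 0) ∨
    (∃ j, j < i ∧ (passOne l).2.getD i 0 = (i : Int) - (j : Int) ∧ l.getD j 0 = l.getD i 0 ∧
      ∀ k, j < k → k < i → l.getD k 0 ≠ l.getD i 0) := by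
  induction l using List.reverseRecOn generalizing i with
  | nil => simp at hi
  | append_singleton xs x ih =>
    rw [passOne_snoc]
    rcases Nat.lt_or_ge i xs.length with h | h
    · have hres : ∀ r : Int, ((passOne xs).2 ++ [r]).getD i 0 = (passOne xs).2.getD i 0 :=
        fun r => getD_concat_left (by rw [passOne_len]; exact h) 0
      rcases ih i h with ⟨h1, h2⟩ | ⟨j, hj, h1, h2, h3⟩
      · left
        refine ⟨by rw [hres _]; exact h1, ?_⟩
        intro j hj
        rw [getD_concat_left (by omega) 0, getD_concat_left h 0]
        exact h2 j hj
      · right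
        refine ⟨j, hj, by rw [hres _]; exact h1, ?_, ?_⟩
        · rw [getD_concat_left (by omega) 0, getD_concat_left h 0]; exact h2
        · intro k hk1 hk2
          rw [getD_concat_left (by omega) 0, getD_concat_left h 0]
          exact h3 k hk1 hk2
    · have hie : i = xs.length := by simp at hi; omega
      subst hie
      have hres : ∀ r : Int, ((passOne xs).2 ++ [r]).getD xs.length 0 = r := by
        intro r
        have := getD_concat_length (passOne xs).2 r 0
        rwa [passOne_len] at this
      have hvi : (xs ++ [x]).getD xs.length 0 = x := getD_concat_length xs x 0
      rcases dict_spec xs x with ⟨hnone, hall⟩ | ⟨j, hj, hget, hval, hmax⟩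
      · left
        rw [hnone]
        refine ⟨hres _, ?_⟩
        intro j hj
        rw [getD_concat_left hj 0, hvi]
        exact hall j hj
      · right
        rw [hget]
        refine ⟨j, hj, hres _, ?_, ?_⟩
        · rw [getD_concat_left hj 0, hvi]; exact hval
        · intro k hk1 hk2
          rw [getD_concat_left hk2 0, hvi]
          exact hmax k hk1 hk2

theorem kdajLoop_eq (l : List Int) (n t : Int) :
    ∀ (fuel : Nat) (p j : Int)
      (h : ∃ m : Nat, PySem.List.pyGet? l (PySem.Int.mod (j - m) n) = some t),
      Nat.find h < fuel →
      kdajLoop l n t p j fuel = p + Nat.find h := by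
  intro fuel
  induction fuel with
  | zero => intro p j h hf; omega
  | succ f ih =>
    intro p j h hf
    by_cases h0 : PySem.List.pyGet? l (PySem.Int.mod j n) = some t
    · have hfind : Nat.find h = 0 := by
        rw [Nat.find_eq_zero]; simpa using h0
      simp [kdajLoop, h0, hfind]
    · have h' : ∃ m : Nat, PySem.List.pyGet? l (PySem.Int.mod ((j - 1) - m) n) = some t := by
        obtain ⟨m, hm⟩ := h
        rcases m with _ | m
        · exact absurd (by simpa using hm) h0
        · exact ⟨m, by convert hm using 3; push_cast; ring⟩
      have hne : Nat.find h ≠ 0 := by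
        intro hz
        have := Nat.find_spec h
        rw [hz] at this
        exact h0 (by simpa using this)
      have hshift : Nat.find h = Nat.find h' + 1 := by
        obtain ⟨k, hk⟩ : ∃ k, Nat.find h = k + 1 := ⟨Nat.find h - 1, by omega⟩
        rw [hk]
        congr 1
        apply le_antisymm
        · by_contra hlt
          push Not at hlt
          have hsp := Nat.find_spec h'
          have hmin := Nat.find_min h (m := Nat.find h' + 1) (by omega)
          apply hmin
          convert hsp using 3; push_cast; ring
        · apply Nat.find_le
          have hsp := Nat.find_spec h
          rw [hk] at hsp
          convert hsp using 3; push_cast; ring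
      have hf' : Nat.find h' < f := by omega
      have := ih (p + 1) (j - 1) h' hf'
      simp only [kdajLoop, if_pos h0]
      rw [this, hshift]; push_cast; ring

theorem pyGet_mod_of_nonneg (l : List Int) (x : Int) (h0 : 0 ≤ x) (h1 : x < l.length) :
    PySem.List.pyGet? l (PySem.Int.mod x l.length) = some (l.getD x.toNat 0) := by
  have hn : (0:Int) < l.length := by omega
  rw [PySem.Int.mod_eq_emod_of_pos hn, Int.emod_eq_of_lt h0 h1,
    PySem.List.pyGet?_of_nonneg _ h0]
  have hx : x.toNat < l.length := by omega
  rw [List.getElem?_eq_getElem hx, List.getD_eq_getElem _ _ hx]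

theorem pyGet_mod_of_neg (l : List Int) (x : Int) (h0 : -(l.length:Int) ≤ x) (h1 : x < 0) :
    PySem.List.pyGet? l (PySem.Int.mod x l.length) = some (l.getD (x + l.length).toNat 0) := by
  have hn : (0:Int) < l.length := by omega
  have hm : PySem.Int.mod x (l.length:Int) = x + l.length := by
    rw [PySem.Int.mod_eq_emod_of_pos hn]
    have h2 := Int.add_emod_right x (l.length:Int)
    rw [← h2, Int.emod_eq_of_lt (by omega) (by omega)]
  rw [hm, PySem.List.pyGet?_of_nonneg _ (by omega)]
  have hx : (x + l.length).toNat < l.length := by omega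
  rw [List.getElem?_eq_getElem hx, List.getD_eq_getElem _ _ hx]

theorem elt_eq (l : List Int) (k : Nat) (hk : k < l.length) :
    kdajLoop l l.length (l.getD k 0) 1 ((k:Int) - 1) (l.length + 1)
    = if (passOne l).2.getD k 0 = -1
      then (k:Int) + l.length - (((passOne l).1.get? (l.getD k 0)).getD 0)
      else (passOne l).2.getD k 0 := by
  rcases res_spec l k hk with ⟨h1, h2⟩ | ⟨j, hj, h1, h2, h3⟩
  · -- no earlier occurrence: use the dict (last occurrence overall)
    rcases dict_spec l (l.getD k 0) with ⟨_, hall⟩ | ⟨j, hj, hget, hval, hmax⟩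
    · exact absurd rfl (hall k hk)
    · have hkj : k ≤ j := by
        by_contra hlt
        exact h2 j (by omega) hval
      have hex : ∃ m : Nat,
          PySem.List.pyGet? l (PySem.Int.mod ((k:Int) - 1 - m) l.length) = some (l.getD k 0) := by
        refine ⟨k + l.length - j - 1, ?_⟩
        have hx : (k:Int) - 1 - (k + l.length - j - 1 : Nat) = (j:Int) - l.length := by
          omega
        rw [hx, pyGet_mod_of_neg l _ (by omega) (by omega)]
        congr 1
        have : ((j:Int) - l.length + l.length).toNat = j := by omega
        rw [this, hval]
      have hfind : Nat.find hex = k + l.length - j - 1 := by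
        rw [Nat.find_eq_iff]
        constructor
        · have hx : (k:Int) - 1 - (k + l.length - j - 1 : Nat) = (j:Int) - l.length := by
            omega
          rw [hx, pyGet_mod_of_neg l _ (by omega) (by omega)]
          congr 1
          have : ((j:Int) - l.length + l.length).toNat = j := by omega
          rw [this, hval]
        · intro m hm
          set x : Int := (k:Int) - 1 - m with hxdef
          by_cases hx0 : (0:Int) ≤ x
          · rw [pyGet_mod_of_nonneg l x hx0 (by omega)]
            intro hc
            have hxk : x.toNat < k := by omega
            exact h2 x.toNat hxk (by injection hc)
          · rw [pyGet_mod_of_neg l x (by omega) (by omega)]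
            intro hc
            have hj1 : j < (x + l.length).toNat := by omega
            have hj2 : (x + l.length).toNat < l.length := by omega
            exact hmax _ hj1 hj2 (by injection hc)
      rw [if_pos h1, hget]
      rw [kdajLoop_eq l l.length (l.getD k 0) (l.length + 1) 1 ((k:Int) - 1) hex (by omega)]
      rw [hfind]
      simp only [Option.getD_some]
      omega
  · -- earlier occurrence at j (nearest)
    have hne : (passOne l).2.getD k 0 ≠ -1 := by rw [h1]; omega
    rw [if_neg hne, h1]
    have hex : ∃ m : Nat,
        PySem.List.pyGet? l (PySem.Int.mod ((k:Int) - 1 - m) l.length) = some (l.getD k 0) := by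
      refine ⟨k - j - 1, ?_⟩
      have hx : (k:Int) - 1 - (k - j - 1 : Nat) = (j:Int) := by omega
      rw [hx, pyGet_mod_of_nonneg l _ (by omega) (by omega)]
      simp only [Int.toNat_natCast]
      rw [h2]
    have hfind : Nat.find hex = k - j - 1 := by
      rw [Nat.find_eq_iff]
      constructor
      · have hx : (k:Int) - 1 - (k - j - 1 : Nat) = (j:Int) := by omega
        rw [hx, pyGet_mod_of_nonneg l _ (by omega) (by omega)]
        simp only [Int.toNat_natCast]
        rw [h2]
      · intro m hm
        set x : Int := (k:Int) - 1 - m with hxdef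
        rw [pyGet_mod_of_nonneg l x (by omega) (by omega)]
        intro hc
        have hj1 : j < x.toNat := by omega
        have hj2 : x.toNat < k := by omega
        exact h3 x.toNat hj1 hj2 (by injection hc)
    rw [kdajLoop_eq l l.length (l.getD k 0) (l.length + 1) 1 ((k:Int) - 1) hex (by omega)]
    rw [hfind]
    omega

theorem main_eq (l : List Int) : kdaj_prej l = kdaj_prej_alt l := by
  simp only [kdaj_prej, kdaj_prej_alt]
  rw [PySem.List.foldl_append_singleton_eq_map
    (fun i => kdajLoop l l.length (PySem.List.pyGetD l i 0) 1 (i - 1) (l.length + 1)) _ []]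
  rw [List.nil_append]
  apply List.ext_getElem
  · simp [PySem.List.length_pyRange_one, PySem.List.length_enumerate, passOne_len]
  · intro k h1 h2
    have hk : k < l.length := by
      simpa [PySem.List.length_pyRange_one] using h1
    have hkz : k < ((passOne l).2.zip l).length := by
      simp [passOne_len]; omega
    rw [List.getElem_map, List.getElem_map, PySem.List.getElem_pyRange_one,
      PySem.List.getElem_enumerate _ _ _ (by simpa [PySem.List.length_enumerate] using hkz),
      List.getElem_zip]
    simp only [zero_add, PySem.List.pyGetD_natCast]
    have hres : (passOne l).2[k]'(by rw [passOne_len]; exact hk) = (passOne l).2.getD k 0 :=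
      (List.getD_eq_getElem _ _ _).symm
    have hl : l[k] = l.getD k 0 := (List.getD_eq_getElem _ _ hk).symm
    simp only [hres, hl]
    have := elt_eq l k hk
    exact this

-- ===== VERDICT (by name: the statement is the Claim_ definition above) =====
theorem kdaj_prej_spec : Claim_equal_kdaj_prej := by
  intro l _
  unfold Spec_kdaj_prej
  exact main_eq l
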